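-- pv_equiv track=rewrite | github.com/jinluchang/Qlattice | qlat/pylib/auto_contractor/ama.py | merge_description_dict
-- ===== SOURCE A (Python) =====
-- def merge_description_dict(d1, d2):
--     sd1 = set(d1)
--     sd2 = set(d2)
--     common_keys = sd1 & sd2
--     for key in common_keys:
--         if d1[key] != d2[key]:
--             return None
--     new_keys = sd2 - sd1
--     d = d1.copy()
--     for key in new_keys:
--         d[key] = d2[key]
--     return d
-- ===== SOURCE B (Python) =====
-- def merge_description_dict(d1, d2):
--     d = {**d1, **d2}
--     if all(d[key] == val for key, val in d1.items()):
--         return d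
--     return None
-- ===== Notes on version B (the rewrite author's own statement) =====
-- stated objective: simpler
-- what changed: Merges first and checks afterwards: B builds the union {**d1, **d2} up front (d2 winning on shared keys) and then validates it by verifying the merged dict still agrees with d1 on all of d1's keys, instead of A's staged key-set intersection agreement loop followed by a key-set difference copy loop.
import Mathlib
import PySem

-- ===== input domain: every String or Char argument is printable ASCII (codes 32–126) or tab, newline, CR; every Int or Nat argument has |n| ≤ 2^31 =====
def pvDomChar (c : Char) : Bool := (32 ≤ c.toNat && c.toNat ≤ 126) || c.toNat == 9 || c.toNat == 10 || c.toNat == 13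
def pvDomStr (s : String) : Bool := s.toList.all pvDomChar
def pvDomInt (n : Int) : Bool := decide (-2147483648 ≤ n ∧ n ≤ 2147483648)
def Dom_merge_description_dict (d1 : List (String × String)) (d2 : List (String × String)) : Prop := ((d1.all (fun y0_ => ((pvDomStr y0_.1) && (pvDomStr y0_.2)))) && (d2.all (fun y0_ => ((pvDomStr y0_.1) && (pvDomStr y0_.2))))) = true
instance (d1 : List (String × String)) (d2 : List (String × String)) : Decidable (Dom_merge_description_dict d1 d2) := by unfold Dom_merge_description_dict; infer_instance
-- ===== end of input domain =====

-- B merges first and checks afterwards: it builds the union {**d1, **d2} and then validates it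
-- against d1, instead of A's staged intersection-check and difference-copy loops; objective: simpler.

-- ===== PORT A =====
-- 'for key in common_keys: if d1[key] != d2[key]: return None' as a recursive Bool check over
-- the intersection list; get? is exact here: every key of common_keys is present in both dicts.
def mddCheck (D1 D2 : PySem.Dict String String) : List String → Bool
  | [] => true
  | k :: rest => if D1.get? k ≠ D2.get? k then false else mddCheck D1 D2 rest

def merge_description_dict (d1 : List (String × String)) (d2 : List (String × String)) : Option (List (String × String)) :=
  let D1 : PySem.Dict String String := PySem.Dict.mk d1
  let D2 : PySem.Dict String String := PySem.Dict.mk d2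
  let sd1 := PySem.Set.ofList D1.keys
  let sd2 := PySem.Set.ofList D2.keys
  let common_keys := PySem.Set.inter sd1 sd2
  if mddCheck D1 D2 common_keys then
    -- 'd = d1.copy(); for key in new_keys: d[key] = d2[key]'; getD is exact: new_keys ⊆ d2's keys
    let new_keys := PySem.Set.diff sd2 sd1
    let d := new_keys.foldl (fun d k => d.insert k (D2.getD k "")) D1
    some d.items
  else none

-- ===== PORT B =====
-- 'd = {**d1, **d2}': start from d1's dict and insert every pair of d2 (overwrite in place,
-- new keys append — exactly Python's dict-unpacking order); then
-- 'all(d[key] == val for key, val in d1.items())'; getD is exact: every key of d1 is a key of d.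
def merge_description_dict_alt (d1 : List (String × String)) (d2 : List (String × String)) : Option (List (String × String)) :=
  let d := d2.foldl (fun d p => d.insert p.1 p.2) (PySem.Dict.mk d1)
  if (PySem.Dict.mk d1).items.all (fun p => d.getD p.1 "" == p.2) then some d.items
  else none

-- ===== PRECONDITION & SPEC =====
-- Pre_ excludes association lists with duplicate keys: the arguments encode Python dicts,
-- which cannot contain a duplicate key, so such lists correspond to no Python input.
def Pre_merge_description_dict (d1 : List (String × String)) (d2 : List (String × String)) : Prop :=
  (d1.map Prod.fst).Nodup ∧ (d2.map Prod.fst).Nodup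
instance (d1 : List (String × String)) (d2 : List (String × String)) : Decidable (Pre_merge_description_dict d1 d2) := by unfold Pre_merge_description_dict; infer_instance

def pvWitness_merge_description_dict : (List (String × String)) × (List (String × String)) :=
  ([("a", "1")], [("a", "1"), ("b", "2")])

def Spec_merge_description_dict (d1 : List (String × String)) (d2 : List (String × String)) (out : Option (List (String × String))) : Prop := out = merge_description_dict_alt d1 d2
instance (d1 : List (String × String)) (d2 : List (String × String)) (out : Option (List (String × String))) : Decidable (Spec_merge_description_dict d1 d2 out) := by unfold Spec_merge_description_dict; infer_instance

-- ===== CLAIM (what is proved, stated in full; the proofs are below) =====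
def Claim_equal_merge_description_dict : Prop := ∀ (d1 : List (String × String)) (d2 : List (String × String)), Dom_merge_description_dict d1 d2 → Pre_merge_description_dict d1 d2 → Spec_merge_description_dict d1 d2 (merge_description_dict d1 d2)

-- ===== LEMMAS AND PROOFS =====

theorem mddCheck_iff (D1 D2 : PySem.Dict String String) (l : List String) :
    mddCheck D1 D2 l = true ↔ ∀ k ∈ l, D1.get? k = D2.get? k := by
  induction l with
  | nil => simp [mddCheck]
  | cons k rest ih =>
    by_cases h : D1.get? k = D2.get? k
    · simp [mddCheck, h, ih]
    · simp [mddCheck, h]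

theorem mddContains (d1 : List (String × String)) (x : String) :
    (PySem.Dict.mk d1).contains x = (d1.map Prod.fst).contains x := by
  rw [Bool.eq_iff_iff, List.contains_iff_mem, PySem.Dict.contains_iff_mem_keys, PySem.Dict.keys_mk]

-- both programs compute 'if every shared key agrees then d1 ++ (d2's fresh-key items) else None'
theorem mdd_A_eq_spec (d1 d2 : List (String × String))
    (h1 : (d1.map Prod.fst).Nodup) (h2 : (d2.map Prod.fst).Nodup) :
    merge_description_dict d1 d2 =
      (if d2.all (fun p => !(PySem.Dict.mk d1).contains p.1 || ((PySem.Dict.mk d1).get? p.1 == some p.2)) then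
        some (d1 ++ d2.filter (fun p => !(PySem.Dict.mk d1).contains p.1))
      else none) := by
  unfold merge_description_dict
  simp only [PySem.Dict.keys_mk,
    PySem.Set.ofList_eq_self_of_nodup _ h1, PySem.Set.ofList_eq_self_of_nodup _ h2]
  have hD2nd : (PySem.Dict.mk d2).keys.Nodup := by rw [PySem.Dict.keys_mk]; exact h2
  -- the agreement check over the intersection equals the per-item check over d2
  have hcheck : mddCheck (PySem.Dict.mk d1) (PySem.Dict.mk d2)
      (PySem.Set.inter (d1.map Prod.fst) (d2.map Prod.fst))
      = d2.all (fun p => !(PySem.Dict.mk d1).contains p.1 || ((PySem.Dict.mk d1).get? p.1 == some p.2)) := by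
    rw [Bool.eq_iff_iff, mddCheck_iff, List.all_eq_true]
    constructor
    · intro h p hp
      by_cases hc : (PySem.Dict.mk d1).contains p.1 = true
      · have hk1 : p.1 ∈ d1.map Prod.fst := by
          rw [← PySem.Dict.keys_mk (ps := d1)]
          exact (PySem.Dict.contains_iff_mem_keys _ _).mp hc
        have hk2 : p.1 ∈ d2.map Prod.fst := List.mem_map_of_mem hp
        have hmem : p.1 ∈ PySem.Set.inter (d1.map Prod.fst) (d2.map Prod.fst) := by
          unfold PySem.Set.inter
          rw [List.mem_filter]
          exact ⟨hk1, by rw [PySem.Set.contains, List.contains_iff_mem]; exact hk2⟩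
        have hget2 : (PySem.Dict.mk d2).get? p.1 = some p.2 :=
          (PySem.Dict.get?_eq_some_iff_mem_items _ _ _ hD2nd).mpr (by simpa using hp)
        simp [h p.1 hmem, hget2]
      · have hcf : (PySem.Dict.mk d1).contains p.1 = false := Bool.eq_false_iff.mpr hc
        simp [hcf]
    · intro h k hk
      unfold PySem.Set.inter at hk
      rw [List.mem_filter] at hk
      obtain ⟨hk1, hk2⟩ := hk
      rw [PySem.Set.contains, List.contains_iff_mem, List.mem_map] at hk2
      obtain ⟨p, hp, hpk⟩ := hk2
      have hc : (PySem.Dict.mk d1).contains p.1 = true := by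
        rw [PySem.Dict.contains_iff_mem_keys, PySem.Dict.keys_mk]; rw [hpk]; exact hk1
      have := h p hp
      rw [hc] at this
      simp only [Bool.not_true, Bool.false_or, beq_iff_eq] at this
      have hget2 : (PySem.Dict.mk d2).get? p.1 = some p.2 :=
        (PySem.Dict.get?_eq_some_iff_mem_items _ _ _ hD2nd).mpr (by simpa using hp)
      rw [← hpk, this, hget2]
  rw [hcheck]
  by_cases hall : d2.all (fun p => !(PySem.Dict.mk d1).contains p.1 || ((PySem.Dict.mk d1).get? p.1 == some p.2)) = true
  · rw [if_pos hall, if_pos hall]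
    -- the new-keys fold appends exactly the d2-pairs whose key is not in d1
    have hnew : PySem.Set.diff (d2.map Prod.fst) (d1.map Prod.fst)
        = (d2.filter (fun p => !(PySem.Dict.mk d1).contains p.1)).map Prod.fst := by
      unfold PySem.Set.diff
      have heq : (fun x => !PySem.Set.contains (d1.map Prod.fst) x) ∘ Prod.fst
          = fun p : String × String => !(PySem.Dict.mk d1).contains p.1 := by
        funext p
        simp only [Function.comp_apply, PySem.Set.contains]
        rw [mddContains]
      rw [List.filter_map, heq]
    rw [hnew]
    have hfst : ∀ p ∈ d2.filter (fun p => !(PySem.Dict.mk d1).contains p.1), p ∈ d2 :=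
      fun p hp => (List.mem_filter.mp hp).1
    have hfresh : ∀ p ∈ d2.filter (fun p => !(PySem.Dict.mk d1).contains p.1),
        (PySem.Dict.mk d1).contains p.1 = false := by
      intro p hp
      have := (List.mem_filter.mp hp).2
      simpa using this
    rw [List.foldl_map]
    have := PySem.Dict.items_foldl_insert_fresh
      (l := d2.filter (fun p => !(PySem.Dict.mk d1).contains p.1))
      (k := Prod.fst) (v := fun p => (PySem.Dict.mk d2).getD p.1 "")
      (d := PySem.Dict.mk d1) hfresh (by rw [← hnew]; exact (h2.filter _))
    simp only [this]
    have hmapid : (d2.filter (fun p => !(PySem.Dict.mk d1).contains p.1)).map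
        (fun a => (a.1, (PySem.Dict.mk d2).getD a.1 ""))
        = d2.filter (fun p => !(PySem.Dict.mk d1).contains p.1) := by
      refine (List.map_congr_left ?_).trans (List.map_id _)
      intro p hp
      have hg : (PySem.Dict.mk d2).getD p.1 "" = p.2 :=
        PySem.Dict.getD_of_mem_items _ (by simpa using hfst p hp) hD2nd ""
      simp [hg]
    simp only [hmapid]
  · rw [if_neg hall, if_neg hall]

-- lookup in the union fold: d2's value if present (d2's keys are distinct), else the base dict's
theorem mddUnionGet (l : List (String × String)) :
    ∀ (d : PySem.Dict String String), (l.map Prod.fst).Nodup → ∀ (k : String),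
      (l.foldl (fun d p => d.insert p.1 p.2) d).get? k
        = ((PySem.Dict.mk l).get? k).or (d.get? k) := by
  induction l with
  | nil => intro d _ k; simp [PySem.Dict.get?]
  | cons a rest ih =>
    intro d hnd k
    have hpair := List.nodup_cons.mp (show (a.1 :: rest.map Prod.fst).Nodup by simpa using hnd)
    rw [List.foldl_cons, ih _ hpair.2 k, PySem.Dict.get?_mk_cons]
    by_cases hk : a.1 = k
    · have hr : (PySem.Dict.mk rest).get? k = none := by
        rw [PySem.Dict.get?_eq_none_iff_not_mem_keys, PySem.Dict.keys_mk, ← hk]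
        exact hpair.1
      simp [hr, hk, PySem.Dict.get?_insert_self]
    · simp [hk, PySem.Dict.get?_insert_of_ne _ _ (Ne.symm hk)]

theorem mdd_B_eq_spec (d1 d2 : List (String × String))
    (h1 : (d1.map Prod.fst).Nodup) (h2 : (d2.map Prod.fst).Nodup) :
    merge_description_dict_alt d1 d2 =
      (if d2.all (fun p => !(PySem.Dict.mk d1).contains p.1 || ((PySem.Dict.mk d1).get? p.1 == some p.2)) then
        some (d1 ++ d2.filter (fun p => !(PySem.Dict.mk d1).contains p.1))
      else none) := by
  unfold merge_description_dict_alt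
  have hD1nd : (PySem.Dict.mk d1).keys.Nodup := by rw [PySem.Dict.keys_mk]; exact h1
  have hD2nd : (PySem.Dict.mk d2).keys.Nodup := by rw [PySem.Dict.keys_mk]; exact h2
  have hu := mddUnionGet d2 (PySem.Dict.mk d1) h2
  set U := d2.foldl (fun d p => d.insert p.1 p.2) (PySem.Dict.mk d1) with hU
  show (if ((PySem.Dict.mk d1).items.all fun p => U.getD p.1 "" == p.2) = true
    then some U.items else none) = _
  -- B's post-merge validation equals the per-item agreement check over d2
  have hcheck : (PySem.Dict.mk d1).items.all (fun p => U.getD p.1 "" == p.2)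
      = d2.all (fun p => !(PySem.Dict.mk d1).contains p.1 || ((PySem.Dict.mk d1).get? p.1 == some p.2)) := by
    rw [Bool.eq_iff_iff, List.all_eq_true, List.all_eq_true]
    constructor
    · intro h p hp
      by_cases hc : (PySem.Dict.mk d1).contains p.1 = true
      · rw [hc]
        have hg2 : (PySem.Dict.mk d2).get? p.1 = some p.2 :=
          (PySem.Dict.get?_eq_some_iff_mem_items _ _ _ hD2nd).mpr (by simpa using hp)
        have hk1 : p.1 ∈ (PySem.Dict.mk d1).keys :=
          (PySem.Dict.contains_iff_mem_keys _ _).mp hc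
        rw [PySem.Dict.keys_mk] at hk1
        obtain ⟨q, hq, hqk⟩ := List.mem_map.mp hk1
        have hmem1 : (p.1, q.2) ∈ d1 := by rw [← hqk]; exact hq
        have hv : (PySem.Dict.mk d1).get? p.1 = some q.2 :=
          (PySem.Dict.get?_eq_some_iff_mem_items _ _ _ hD1nd).mpr (by simpa using hmem1)
        have hval := h (p.1, q.2) hmem1
        rw [PySem.Dict.getD_eq_get?_getD, hu p.1, hg2] at hval
        simp only [Option.some_or, Option.getD_some, beq_iff_eq] at hval
        simp [hv, hval]
      · have hcf : (PySem.Dict.mk d1).contains p.1 = false := Bool.eq_false_iff.mpr hc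
        simp [hcf]
    · intro h p hp
      have hp1 : p ∈ d1 := by simpa using hp
      have hg1 : (PySem.Dict.mk d1).get? p.1 = some p.2 :=
        (PySem.Dict.get?_eq_some_iff_mem_items _ _ _ hD1nd).mpr (by simpa using hp1)
      rw [PySem.Dict.getD_eq_get?_getD, hu p.1]
      cases hg2 : (PySem.Dict.mk d2).get? p.1 with
      | none => simp [hg1]
      | some w =>
        have hmem2 : (p.1, w) ∈ d2 := by
          have := PySem.Dict.mem_items_of_get?_eq_some _ hg2
          simpa using this
        have hc : (PySem.Dict.mk d1).contains p.1 = true := by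
          rw [mddContains]
          simpa using List.mem_map_of_mem (f := Prod.fst) hp1
        have := h (p.1, w) hmem2
        rw [hc] at this
        simp only [Bool.not_true, Bool.false_or, beq_iff_eq] at this
        rw [hg1] at this
        simp [Option.some.inj this]
  rw [hcheck]
  by_cases hall : d2.all (fun p => !(PySem.Dict.mk d1).contains p.1 || ((PySem.Dict.mk d1).get? p.1 == some p.2)) = true
  · rw [if_pos hall, if_pos hall]
    have hallm := List.all_eq_true.mp hall
    -- the union's key list is d1's keys followed by d2's fresh keys
    have hkeys : U.keys = (d1 ++ d2.filter (fun p => !(PySem.Dict.mk d1).contains p.1)).map Prod.fst := by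
      rw [hU, PySem.Dict.keys_foldl_insert_key, PySem.Dict.keys_mk,
        PySem.Set.update_eq_append_filter, PySem.Set.ofList_eq_self_of_nodup _ h2]
      have heq : (fun y => !PySem.Set.contains (d1.map Prod.fst) y) ∘ Prod.fst
          = fun p : String × String => !(PySem.Dict.mk d1).contains p.1 := by
        funext p
        simp only [Function.comp_apply, PySem.Set.contains]
        rw [mddContains]
      simp only [List.map_append, List.filter_map, heq]
    have hUnd : U.keys.Nodup := by
      rw [hU]
      exact PySem.Dict.nodup_keys_foldl_insert_key d2 Prod.fst (fun _ p => p.2) _ hD1nd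
    -- and every union entry carries the expected value, so items = d1 ++ fresh pairs of d2
    rw [Option.some.injEq, PySem.Dict.items_eq_map_keys U hUnd "", hkeys, List.map_map]
    refine (List.map_congr_left ?_).trans (List.map_id _)
    intro p hp
    simp only [Function.comp_apply, id]
    have hg : U.getD p.1 "" = p.2 := by
      rw [PySem.Dict.getD_eq_get?_getD, hu p.1]
      rcases List.mem_append.mp hp with hp1 | hpf
      · have hg1 : (PySem.Dict.mk d1).get? p.1 = some p.2 :=
          (PySem.Dict.get?_eq_some_iff_mem_items _ _ _ hD1nd).mpr (by simpa using hp1)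
        cases hg2 : (PySem.Dict.mk d2).get? p.1 with
        | none => simp [hg1]
        | some w =>
          have hmem2 : (p.1, w) ∈ d2 := by
            have := PySem.Dict.mem_items_of_get?_eq_some _ hg2
            simpa using this
          have hc : (PySem.Dict.mk d1).contains p.1 = true := by
            rw [mddContains]
            simpa using List.mem_map_of_mem (f := Prod.fst) hp1
          have := hallm (p.1, w) hmem2
          rw [hc] at this
          simp only [Bool.not_true, Bool.false_or, beq_iff_eq] at this
          rw [hg1] at this
          simp [Option.some.inj this]
      · have hg2 : (PySem.Dict.mk d2).get? p.1 = some p.2 :=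
          (PySem.Dict.get?_eq_some_iff_mem_items _ _ _ hD2nd).mpr
            (by simpa using (List.mem_filter.mp hpf).1)
        simp [hg2]
    rw [hg]
  · rw [if_neg hall, if_neg hall]

-- ===== VERDICT (by name: the statement is the Claim_ definition above) =====
theorem merge_description_dict_spec : Claim_equal_merge_description_dict := by
  intro d1 d2 _ hpre
  unfold Spec_merge_description_dict
  rw [mdd_A_eq_spec d1 d2 hpre.1 hpre.2, mdd_B_eq_spec d1 d2 hpre.1 hpre.2]
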